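-- pv_equiv track=rewrite | github.com/AyayaXiaowang/Ayaya_Miliastra_Editor | tools/check_duplicate_config_names.py | find_duplicate_classes
-- ===== SOURCE A (Python) =====
-- from collections import defaultdict
-- from typing import Dict, List, Set, Tuple
--
-- def find_duplicate_classes(file_classes: Dict[str, List[Tuple[str, int]]]) -> Dict[str, List[Tuple[str, int]]]:
--     """
--     找出重复的类名
--
--     返回：{类名: [(文件路径, 行号), ...]}
--     """
--     class_locations = defaultdict(list)
--
--     for file_path, classes in file_classes.items():
--         for class_name, line_number in classes:
--             class_locations[class_name].append((file_path, line_number))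
--
--     # 筛选出出现多次的类名
--     duplicates = {
--         class_name: locations
--         for class_name, locations in class_locations.items()
--         if len(locations) > 1
--     }
--
--     return duplicates
-- ===== SOURCE B (Python) =====
-- def find_duplicate_classes(file_classes):
--     """Brute-force rescan: no grouping dict — for each name at its first
--     occurrence, rescan the flattened list to collect its locations."""
--     flat = [(name, (path, line))
--             for path, classes in file_classes.items()
--             for name, line in classes]
--     duplicates = {}
--     seen = set()
--     for name, _ in flat:
--         if name in seen:
--             continue
--         seen.add(name)
--         locations = [loc for n, loc in flat if n == name]
--         if len(locations) > 1:
--             duplicates[name] = locations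
--     return duplicates
-- ===== Notes on version B (the rewrite author's own statement) =====
-- stated objective: alternative
-- what changed: B drops A's hash-grouping accumulator entirely: it flattens the input once, then for each class name at its first occurrence rescans the flat list to collect that name's locations, emitting the group only if it has more than one member (nested scans over an immutable list instead of incremental dict grouping plus a filter pass).
import Mathlib
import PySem

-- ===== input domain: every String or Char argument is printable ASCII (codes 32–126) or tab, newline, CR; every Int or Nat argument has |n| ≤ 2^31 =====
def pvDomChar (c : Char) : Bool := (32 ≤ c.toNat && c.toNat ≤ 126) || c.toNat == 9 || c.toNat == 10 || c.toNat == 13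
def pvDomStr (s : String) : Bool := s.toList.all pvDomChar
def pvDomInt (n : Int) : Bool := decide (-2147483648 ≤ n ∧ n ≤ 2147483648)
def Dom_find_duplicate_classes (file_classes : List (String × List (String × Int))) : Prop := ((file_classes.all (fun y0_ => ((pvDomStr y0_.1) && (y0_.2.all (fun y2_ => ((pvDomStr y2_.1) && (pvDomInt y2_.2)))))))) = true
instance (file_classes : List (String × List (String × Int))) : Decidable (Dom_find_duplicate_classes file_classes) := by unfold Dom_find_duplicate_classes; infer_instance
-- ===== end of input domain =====

-- B drops A's hash-grouping accumulator: it flattens the input once and, per class name at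
-- its first occurrence, rescans the flat list for that name's locations (objective: alternative).
-- ===== PORT A =====
def find_duplicate_classes (file_classes : List (String × List (String × Int))) : List (String × List (String × Int)) :=
  -- class_locations = defaultdict(list); nested for-loops appending (file_path, line_number)
  let class_locations : PySem.Dict String (List (String × Int)) :=
    file_classes.foldl (fun d fc =>
      fc.2.foldl (fun d cl => d.modify cl.1 [] (fun l => l ++ [(fc.1, cl.2)])) d)
      PySem.Dict.empty
  -- duplicates = {name: locs for ... if len(locs) > 1}
  let duplicates : PySem.Dict String (List (String × Int)) :=
    class_locations.items.foldl (fun d kv =>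
      if kv.2.length > 1 then d.insert kv.1 kv.2 else d) PySem.Dict.empty
  duplicates.items

-- ===== PORT B =====
def find_duplicate_classes_alt (file_classes : List (String × List (String × Int))) : List (String × List (String × Int)) :=
  -- flat = [(name, (path, line)) for ...]
  let flat : List (String × (String × Int)) :=
    file_classes.flatMap (fun fc => fc.2.map (fun cl => (cl.1, (fc.1, cl.2))))
  -- duplicates = {}; seen = set(); for name, _ in flat: ...
  let res : PySem.Dict String (List (String × Int)) × PySem.Set String :=
    flat.foldl (fun st p =>
      if PySem.Set.contains st.2 p.1 then st
      else
        let seen := PySem.Set.add st.2 p.1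
        -- locations = [loc for n, loc in flat if n == name]
        let locations := (flat.filter (fun q => q.1 == p.1)).map (fun q => q.2)
        if locations.length > 1 then (st.1.insert p.1 locations, seen) else (st.1, seen))
      (PySem.Dict.empty, PySem.Set.empty)
  res.1.items

-- ===== PRECONDITION & SPEC =====
def Spec_find_duplicate_classes (file_classes : List (String × List (String × Int))) (out : List (String × List (String × Int))) : Prop := out = find_duplicate_classes_alt file_classes
instance (file_classes : List (String × List (String × Int))) (out : List (String × List (String × Int))) : Decidable (Spec_find_duplicate_classes file_classes out) := by unfold Spec_find_duplicate_classes; infer_instance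

-- ===== CLAIM (what is proved, stated in full; the proofs are below) =====
def Claim_equal_find_duplicate_classes : Prop := ∀ (file_classes : List (String × List (String × Int))), Dom_find_duplicate_classes file_classes → Spec_find_duplicate_classes file_classes (find_duplicate_classes file_classes)

-- ===== LEMMAS AND PROOFS =====

-- abbreviations used only by the proofs
def pvPairs (fc : List (String × List (String × Int))) : List (String × (String × Int)) :=
  fc.flatMap (fun f => f.2.map (fun cl => (cl.1, (f.1, cl.2))))

def pvStep (d : PySem.Dict String (List (String × Int))) (p : String × (String × Int)) :
    PySem.Dict String (List (String × Int)) :=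
  d.modify p.1 [] (fun l => l ++ [p.2])

-- locations of name k in the flat pair list
def pvLocs (flat : List (String × (String × Int))) (k : String) : List (String × Int) :=
  (flat.filter (fun q => q.1 == k)).map (fun q => q.2)

-- B's step function, with the full flat list fixed
def pvBStep (flat : List (String × (String × Int)))
    (st : PySem.Dict String (List (String × Int)) × PySem.Set String)
    (p : String × (String × Int)) :
    PySem.Dict String (List (String × Int)) × PySem.Set String :=
  if PySem.Set.contains st.2 p.1 then st
  else if ((flat.filter (fun q => q.1 == p.1)).map (fun q => q.2)).length > 1
    then (st.1.insert p.1 ((flat.filter (fun q => q.1 == p.1)).map (fun q => q.2)),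
          PySem.Set.add st.2 p.1)
    else (st.1, PySem.Set.add st.2 p.1)

-- a conditional insert loop over items with distinct keys is a plain filter
theorem pv_items_cond_insert (l : List (String × List (String × Int)))
    (q : String × List (String × Int) → Bool) (hnd : (l.map Prod.fst).Nodup) :
    (l.foldl (fun d kv => if q kv then d.insert kv.1 kv.2 else d)
        (PySem.Dict.empty : PySem.Dict String (List (String × Int)))).items = l.filter q := by
  rw [show (fun (d : PySem.Dict String (List (String × Int))) kv =>
        if q kv then d.insert kv.1 kv.2 else d)
      = (fun d kv => if q kv = true then d.insert kv.1 kv.2 else d) by funext d kv; simp,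
    ← List.foldl_filter]
  have h := PySem.Dict.items_foldl_insert_fresh (l := l.filter q)
      (k := fun kv : String × List (String × Int) => kv.1) (v := fun kv => kv.2)
      (d := (PySem.Dict.empty : PySem.Dict String (List (String × Int))))
      (fun a _ => PySem.Dict.contains_empty _)
      (by simpa using ((List.filter_sublist (l := l) (p := q)).map Prod.fst).nodup hnd)
  simpa using h

-- A's nested grouping loop is the same fold over the flattened pair list
theorem pv_group_eq (fc : List (String × List (String × Int))) :
    fc.foldl (fun d f =>
        f.2.foldl (fun d cl => d.modify cl.1 [] (fun l => l ++ [(f.1, cl.2)])) d)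
      PySem.Dict.empty
    = (pvPairs fc).foldl pvStep PySem.Dict.empty := by
  rw [pvPairs, List.foldl_flatMap]
  simp only [List.foldl_map, pvStep]

-- value stored at key n by the grouping fold = that name's locations
theorem pv_getD (ps : List (String × (String × Int))) (n : String) :
    (ps.foldl pvStep PySem.Dict.empty).getD n [] = pvLocs ps n := by
  have h := PySem.Dict.getD_foldl_modify_append (l := ps)
      (d := (PySem.Dict.empty : PySem.Dict String (List (String × Int)))) (c := n)
  simpa [pvStep, pvLocs] using h

theorem pv_keys (ps : List (String × (String × Int))) :
    (ps.foldl pvStep PySem.Dict.empty).keys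
      = PySem.Set.ofList (ps.map (fun p => p.1)) := by
  have h := PySem.Dict.keys_foldl_modify_key (l := ps) (key := fun p : String × (String × Int) => p.1)
      (d0 := ([] : List (String × Int))) (f := fun _ p => (fun l => l ++ [p.2]))
      (d := PySem.Dict.empty)
  simpa [pvStep, PySem.Set.update_nil_left] using h

theorem pv_nodup_keys (ps : List (String × (String × Int))) :
    (ps.foldl pvStep PySem.Dict.empty).keys.Nodup := by
  have h := PySem.Dict.nodup_keys_foldl_modify_key (l := ps)
      (key := fun p : String × (String × Int) => p.1) (d0 := ([] : List (String × Int)))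
      (f := fun _ p => (fun l => l ++ [p.2])) (d := PySem.Dict.empty)
      (by simp)
  simpa [pvStep] using h

-- B's scan invariant over the processed prefix l (flat is the FULL list scanned for locations)
theorem pv_b_invariant (flat l : List (String × (String × Int))) :
    (l.foldl (pvBStep flat) (PySem.Dict.empty, PySem.Set.empty)).2
      = PySem.Set.ofList (l.map (fun p => p.1)) ∧
    (l.foldl (pvBStep flat) (PySem.Dict.empty, PySem.Set.empty)).1.items
      = ((PySem.Set.ofList (l.map (fun p => p.1))).filter
          (fun k => decide ((pvLocs flat k).length > 1))).map (fun k => (k, pvLocs flat k)) := by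
  induction l using List.reverseRecOn with
  | nil => exact ⟨rfl, rfl⟩
  | append_singleton xs x ih =>
    obtain ⟨ih2, ih1⟩ := ih
    rw [List.foldl_append, List.foldl_cons, List.foldl_nil, List.map_append]
    simp only [List.map_cons, List.map_nil]
    rw [PySem.Set.ofList_append_singleton]
    set st := xs.foldl (pvBStep flat) (PySem.Dict.empty, PySem.Set.empty) with hst
    set N := PySem.Set.ofList (xs.map (fun p => p.1)) with hN
    by_cases hm : x.1 ∈ N
    · have hc : PySem.Set.contains N x.1 = true := by
        simpa [PySem.Set.contains] using hm
      rw [PySem.Set.add_eq_ite, if_pos hm]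
      simp only [pvBStep, ih2, hc]
      exact ⟨ih2, ih1⟩
    · have hc : PySem.Set.contains N x.1 = false := by
        simpa [PySem.Set.contains] using hm
      rw [PySem.Set.add_eq_ite, if_neg hm]
      simp only [pvBStep, ih2, hc, Bool.false_eq_true, if_false, List.filter_append]
      by_cases hlen : ((flat.filter (fun q => q.1 == x.1)).map (fun q => q.2)).length > 1
      · have hlen' : decide ((pvLocs flat x.1).length > 1) = true := by
          simpa [pvLocs] using hlen
        rw [if_pos hlen,
          show List.filter (fun k => decide ((pvLocs flat k).length > 1)) [x.1] = [x.1] by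
            simp [hlen'], List.map_append]
        refine ⟨by rw [PySem.Set.add_eq_ite, if_neg hm], ?_⟩
        have hnotc : st.1.contains x.1 = false := by
          rw [PySem.Dict.contains_eq_decide_mem_keys, decide_eq_false_iff_not]
          intro hk
          have : x.1 ∈ st.1.items.map Prod.fst := hk
          rw [ih1] at this
          rcases List.mem_map.mp this with ⟨p, hp, hpk⟩
          rcases List.mem_map.mp hp with ⟨k, hkf, rfl⟩
          exact hm (by simpa [← hpk] using (List.mem_filter.mp hkf).1)
        rw [PySem.Dict.items_insert_of_not_contains (h := hnotc), ih1]
        simp [pvLocs]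
      · have hlen' : decide ((pvLocs flat x.1).length > 1) = false := by
          simpa [pvLocs] using hlen
        rw [if_neg hlen,
          show List.filter (fun k => decide ((pvLocs flat k).length > 1)) [x.1] = [] by
            simp [hlen'], List.append_nil]
        exact ⟨by rw [PySem.Set.add_eq_ite, if_neg hm], ih1⟩

-- A = B
theorem pv_main (fc : List (String × List (String × Int))) :
    find_duplicate_classes fc = find_duplicate_classes_alt fc := by
  show (((fc.foldl (fun d f =>
        f.2.foldl (fun d cl => d.modify cl.1 [] (fun l => l ++ [(f.1, cl.2)])) d)
      PySem.Dict.empty).items.foldl (fun d kv =>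
      if kv.2.length > 1 then d.insert kv.1 kv.2 else d) PySem.Dict.empty).items)
    = ((pvPairs fc).foldl (pvBStep (pvPairs fc)) (PySem.Dict.empty, PySem.Set.empty)).1.items
  rw [pv_group_eq, (pv_b_invariant (pvPairs fc) (pvPairs fc)).2]
  set ps := pvPairs fc with hps
  set g := ps.foldl pvStep PySem.Dict.empty with hg
  -- A's conditional-insert fold over g.items is a plain filter of g.items
  have hfst : g.items.map Prod.fst = g.keys := rfl
  rw [show (fun (d : PySem.Dict String (List (String × Int))) kv =>
        if kv.2.length > 1 then d.insert kv.1 kv.2 else d)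
      = (fun d kv => if (fun kv : String × List (String × Int) =>
          decide (kv.2.length > 1)) kv then d.insert kv.1 kv.2 else d) by
    funext d kv; by_cases h : kv.2.length > 1 <;> simp [h]]
  rw [pv_items_cond_insert _ _ (by rw [hfst]; exact pv_nodup_keys ps)]
  -- g.items is the key list mapped through its stored locations
  rw [PySem.Dict.items_eq_map_keys g (pv_nodup_keys ps) [], hg, pv_keys,
    show (fun k => (k, (ps.foldl pvStep PySem.Dict.empty).getD k []))
      = (fun k => (k, pvLocs ps k)) by funext k; rw [pv_getD],
    List.filter_map]
  rfl

-- ===== VERDICT (by name: the statement is the Claim_ definition above) =====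
theorem find_duplicate_classes_spec : Claim_equal_find_duplicate_classes := by
  intro fc _
  unfold Spec_find_duplicate_classes
  exact pv_main fc
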